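-- pv_equiv track=rewrite | github.com/NicolasMelaerts/ML-DL-for-Multimedia-Retrieval | SaaS/routes/deep_search.py | find_matching_race
-- ===== SOURCE A (Python) =====
-- def find_matching_race(race_name, races_list):
--     """
--     Trouve la race correspondante dans la liste, en tenant compte des différents formats
--     """
--     if not races_list:
--         return None
--
--     # Normaliser le nom de race du fichier
--     race_name_lower = race_name.lower()
--
--     # 1. Essayer une correspondance directe
--     for race in races_list:
--         if race.lower() == race_name_lower:
--             return race
--
--     # 2. Essayer en remplaçant les espaces par des underscores
--     for race in races_list:
--         if race.lower().replace(' ', '_') == race_name_lower: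
--             return race
--
--     # 3. Essayer en supprimant les espaces
--     for race in races_list:
--         if race.lower().replace(' ', '') == race_name_lower:
--             return race
--
--     # 4. Essayer une correspondance partielle
--     for race in races_list:
--         race_lower = race.lower()
--         if race_name_lower in race_lower or race_lower in race_name_lower:
--             return race
--
--         # Essayer aussi sans les espaces
--         race_lower_no_spaces = race_lower.replace(' ', '')
--         if race_name_lower in race_lower_no_spaces or race_lower_no_spaces in race_name_lower:
--             return race
--
--     # Si aucune correspondance n'est trouvée, retourner la première race de la liste
--     return races_list[0]
-- ===== SOURCE B (Python) =====
-- def find_matching_race(race_name, races_list):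
--     """Single-pass variant: score each race with its best (smallest) match
--     priority and keep the first race achieving the minimum priority."""
--     if not races_list:
--         return None
--     name = race_name.lower()
--     best_prio = 5
--     best = None
--     for race in races_list:
--         rl = race.lower()
--         if rl == name:
--             p = 1
--         elif rl.replace(' ', '_') == name:
--             p = 2
--         elif rl.replace(' ', '') == name:
--             p = 3
--         else:
--             rns = rl.replace(' ', '')
--             if name in rl or rl in name or name in rns or rns in name:
--                 p = 4
--             else:
--                 continue
--         if p < best_prio:
--             best_prio = p
--             best = race
--     return best if best is not None else races_list[0]
-- ===== Notes on version B (the rewrite author's own statement) =====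
-- stated objective: alternative
-- what changed: Replaced A's four sequential scans of races_list by a single pass that computes each race's smallest satisfied match priority and keeps the first race attaining the minimum priority.
import Mathlib
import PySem

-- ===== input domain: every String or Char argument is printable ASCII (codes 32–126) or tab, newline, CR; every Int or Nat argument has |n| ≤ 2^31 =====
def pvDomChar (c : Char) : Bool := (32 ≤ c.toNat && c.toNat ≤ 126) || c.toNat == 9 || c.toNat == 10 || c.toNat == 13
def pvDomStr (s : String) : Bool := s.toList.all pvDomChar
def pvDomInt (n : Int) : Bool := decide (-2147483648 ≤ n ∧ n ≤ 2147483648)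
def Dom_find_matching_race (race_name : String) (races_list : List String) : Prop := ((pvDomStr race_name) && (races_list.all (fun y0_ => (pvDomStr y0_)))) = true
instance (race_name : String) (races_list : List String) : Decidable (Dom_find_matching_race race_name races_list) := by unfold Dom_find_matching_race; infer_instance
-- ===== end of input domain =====

-- B replaces A's four sequential scans by one pass keeping the first race of minimal match priority (same result, fewer scans; objective: alternative).

-- ===== PORT A =====
-- literal transliteration: four 'for race in races_list: if …: return race' passes, then races_list[0]
def find_matching_race (race_name : String) (races_list : List String) : Option String :=
  match races_list with
  | [] => none
  | r0 :: _ =>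
    match races_list.find? (fun race => PySem.Str.lower race == PySem.Str.lower race_name) with
    | some race => some race
    | none =>
      match races_list.find? (fun race => PySem.Str.replace (PySem.Str.lower race) " " "_" == PySem.Str.lower race_name) with
      | some race => some race
      | none =>
        match races_list.find? (fun race => PySem.Str.replace (PySem.Str.lower race) " " "" == PySem.Str.lower race_name) with
        | some race => some race
        | none =>
          match races_list.find? (fun race =>
              PySem.Str.isIn (PySem.Str.lower race_name) (PySem.Str.lower race) ||
              PySem.Str.isIn (PySem.Str.lower race) (PySem.Str.lower race_name) ||
              PySem.Str.isIn (PySem.Str.lower race_name) (PySem.Str.replace (PySem.Str.lower race) " " "") ||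
              PySem.Str.isIn (PySem.Str.replace (PySem.Str.lower race) " " "") (PySem.Str.lower race_name)) with
          | some race => some race
          | none => some r0

-- ===== PORT B =====
-- Source B's per-race priority: 1..4, or 5 meaning "no match (continue)"
def pvPrio (name : String) (race : String) : Nat :=
  if PySem.Str.lower race == name then 1
  else if PySem.Str.replace (PySem.Str.lower race) " " "_" == name then 2
  else if PySem.Str.replace (PySem.Str.lower race) " " "" == name then 3
  else if PySem.Str.isIn name (PySem.Str.lower race) || PySem.Str.isIn (PySem.Str.lower race) name ||
          PySem.Str.isIn name (PySem.Str.replace (PySem.Str.lower race) " " "") ||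
          PySem.Str.isIn (PySem.Str.replace (PySem.Str.lower race) " " "") name then 4
  else 5

def find_matching_race_alt (race_name : String) (races_list : List String) : Option String :=
  match races_list with
  | [] => none
  | r0 :: _ =>
    match (races_list.foldl
        (fun (acc : Nat × Option String) race =>
          if pvPrio (PySem.Str.lower race_name) race < acc.1 then (pvPrio (PySem.Str.lower race_name) race, some race) else acc)
        (5, none)).2 with
    | some best => some best
    | none => some r0

-- ===== PRECONDITION & SPEC =====
def Spec_find_matching_race (race_name : String) (races_list : List String) (out : Option String) : Prop := out = find_matching_race_alt race_name races_list
instance (race_name : String) (races_list : List String) (out : Option String) : Decidable (Spec_find_matching_race race_name races_list out) := by unfold Spec_find_matching_race; infer_instance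

-- ===== CLAIM (what is proved, stated in full; the proofs are below) =====
def Claim_equal_find_matching_race : Prop := ∀ (race_name : String) (races_list : List String), Dom_find_matching_race race_name races_list → Spec_find_matching_race race_name races_list (find_matching_race race_name races_list)

-- ===== LEMMAS AND PROOFS =====

-- first-some combinator ('x if x is not None else y')
def ob (a b : Option String) : Option String :=
  match a with | some x => some x | none => b

-- recursive characterisation of B's fold (the pending best is the second component)
def F (nl : String) : Nat → List String → Option String
  | _, [] => none
  | p, r :: l => if pvPrio nl r < p then ob (F nl (pvPrio nl r) l) (some r) else F nl p l

theorem prio_pos (nl r : String) : 1 ≤ pvPrio nl r := by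
  unfold pvPrio; split_ifs <;> omega

theorem fold_eq_F (nl : String) (l : List String) : ∀ (p : Nat) (br : Option String),
    (l.foldl (fun (acc : Nat × Option String) race =>
        if pvPrio nl race < acc.1 then (pvPrio nl race, some race) else acc) (p, br)).2
      = ob (F nl p l) br := by
  induction l with
  | nil => intro p br; simp [F, ob]
  | cons r l ih =>
    intro p br
    simp only [List.foldl, F]
    by_cases h : pvPrio nl r < p
    · simp only [h, if_pos h, ih]
      cases hF : F nl (pvPrio nl r) l <;> simp [ob, hF]
    · simp [h, ih]

theorem find?_congr' (p q : String → Bool) (l : List String)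
    (h : ∀ x ∈ l, p x = q x) : l.find? p = l.find? q := by
  induction l with
  | nil => rfl
  | cons r l ih =>
    have hr := h r (by simp)
    simp only [List.find?, hr]
    cases hq : q r
    · simp [ih (fun x hx => h x (by simp [hx]))]
    · simp

theorem F_one (nl : String) (l : List String) : F nl 1 l = none := by
  induction l with
  | nil => rfl
  | cons r l ih =>
    have := prio_pos nl r
    simp only [F]
    rw [if_neg (by omega)]
    exact ih

theorem F_two (nl : String) (l : List String) :
    F nl 2 l = l.find? (fun r => pvPrio nl r == 1) := by
  induction l with
  | nil => rfl
  | cons r l ih =>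
    have h1 := prio_pos nl r
    simp only [F, List.find?]
    by_cases h : pvPrio nl r < 2
    · have : pvPrio nl r = 1 := by omega
      simp [this, F_one, ob]
    · have : (pvPrio nl r == 1) = false := by simp; omega
      simp [h, this, ih]

theorem F_three (nl : String) (l : List String) :
    F nl 3 l = ob (l.find? (fun r => pvPrio nl r == 1)) (l.find? (fun r => pvPrio nl r == 2)) := by
  induction l with
  | nil => rfl
  | cons r l ih =>
    have h1 := prio_pos nl r
    simp only [F, List.find?]
    by_cases h : pvPrio nl r < 3
    · rw [if_pos h]
      rcases Nat.lt_or_ge (pvPrio nl r) 2 with h2 | h2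
      · have e : pvPrio nl r = 1 := by omega
        simp [e, F_one, ob]
      · have e : pvPrio nl r = 2 := by omega
        have e1 : (pvPrio nl r == 1) = false := by simp [e]
        simp only [e, e1, F_two, cond_false]
        cases hf : l.find? (fun r => pvPrio nl r == 1) <;> simp [ob, hf]
    · have e1 : (pvPrio nl r == 1) = false := by simp; omega
      have e2 : (pvPrio nl r == 2) = false := by simp; omega
      simp [h, e1, e2, ih]

theorem F_four (nl : String) (l : List String) :
    F nl 4 l = ob (l.find? (fun r => pvPrio nl r == 1))
                 (ob (l.find? (fun r => pvPrio nl r == 2)) (l.find? (fun r => pvPrio nl r == 3))) := by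
  induction l with
  | nil => rfl
  | cons r l ih =>
    have h1 := prio_pos nl r
    simp only [F, List.find?]
    by_cases h : pvPrio nl r < 4
    · rw [if_pos h]
      rcases Nat.lt_or_ge (pvPrio nl r) 3 with h3 | h3
      · rcases Nat.lt_or_ge (pvPrio nl r) 2 with h2 | h2
        · have e : pvPrio nl r = 1 := by omega
          simp [e, F_one, ob]
        · have e : pvPrio nl r = 2 := by omega
          have e1 : (pvPrio nl r == 1) = false := by simp [e]
          simp only [e, e1, F_two, cond_false]
          cases hf : l.find? (fun r => pvPrio nl r == 1) <;> simp [ob, hf]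
      · have e : pvPrio nl r = 3 := by omega
        have e1 : (pvPrio nl r == 1) = false := by simp [e]
        have e2 : (pvPrio nl r == 2) = false := by simp [e]
        simp only [e, e1, e2, F_three, cond_false]
        cases hf1 : l.find? (fun r => pvPrio nl r == 1) <;>
          cases hf2 : l.find? (fun r => pvPrio nl r == 2) <;> simp [ob, hf1, hf2]
    · have e1 : (pvPrio nl r == 1) = false := by simp; omega
      have e2 : (pvPrio nl r == 2) = false := by simp; omega
      have e3 : (pvPrio nl r == 3) = false := by simp; omega
      simp [h, e1, e2, e3, ih]

theorem F_five (nl : String) (l : List String) :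
    F nl 5 l = ob (l.find? (fun r => pvPrio nl r == 1))
                 (ob (l.find? (fun r => pvPrio nl r == 2))
                    (ob (l.find? (fun r => pvPrio nl r == 3)) (l.find? (fun r => pvPrio nl r == 4)))) := by
  induction l with
  | nil => rfl
  | cons r l ih =>
    have h1 := prio_pos nl r
    simp only [F, List.find?]
    by_cases h : pvPrio nl r < 5
    · rw [if_pos h]
      rcases Nat.lt_or_ge (pvPrio nl r) 4 with h4 | h4
      · rcases Nat.lt_or_ge (pvPrio nl r) 3 with h3 | h3
        · rcases Nat.lt_or_ge (pvPrio nl r) 2 with h2 | h2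
          · have e : pvPrio nl r = 1 := by omega
            simp [e, F_one, ob]
          · have e : pvPrio nl r = 2 := by omega
            have e1 : (pvPrio nl r == 1) = false := by simp [e]
            simp only [e, e1, F_two, cond_false]
            cases hf : l.find? (fun r => pvPrio nl r == 1) <;> simp [ob, hf]
        · have e : pvPrio nl r = 3 := by omega
          have e1 : (pvPrio nl r == 1) = false := by simp [e]
          have e2 : (pvPrio nl r == 2) = false := by simp [e]
          simp only [e, e1, e2, F_three, cond_false]
          cases hf1 : l.find? (fun r => pvPrio nl r == 1) <;>
            cases hf2 : l.find? (fun r => pvPrio nl r == 2) <;> simp [ob, hf1, hf2]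
      · have e : pvPrio nl r = 4 := by omega
        have e1 : (pvPrio nl r == 1) = false := by simp [e]
        have e2 : (pvPrio nl r == 2) = false := by simp [e]
        have e3 : (pvPrio nl r == 3) = false := by simp [e]
        simp only [e, e1, e2, e3, F_four, cond_false]
        cases hf1 : l.find? (fun r => pvPrio nl r == 1) <;>
          cases hf2 : l.find? (fun r => pvPrio nl r == 2) <;>
            cases hf3 : l.find? (fun r => pvPrio nl r == 3) <;> simp [ob, hf1, hf2, hf3]
    · have e1 : (pvPrio nl r == 1) = false := by simp; omega
      have e2 : (pvPrio nl r == 2) = false := by simp; omega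
      have e3 : (pvPrio nl r == 3) = false := by simp; omega
      have e4 : (pvPrio nl r == 4) = false := by simp; omega
      simp [h, e1, e2, e3, e4, ih]

-- A's pass predicates
def pa1 (nl : String) (r : String) : Bool := PySem.Str.lower r == nl
def pa2 (nl : String) (r : String) : Bool := PySem.Str.replace (PySem.Str.lower r) " " "_" == nl
def pa3 (nl : String) (r : String) : Bool := PySem.Str.replace (PySem.Str.lower r) " " "" == nl
def pa4 (nl : String) (r : String) : Bool :=
  PySem.Str.isIn nl (PySem.Str.lower r) || PySem.Str.isIn (PySem.Str.lower r) nl ||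
  PySem.Str.isIn nl (PySem.Str.replace (PySem.Str.lower r) " " "") ||
  PySem.Str.isIn (PySem.Str.replace (PySem.Str.lower r) " " "") nl

theorem prio_eq_one (nl r : String) : (pvPrio nl r == 1) = pa1 nl r := by
  unfold pvPrio pa1; split_ifs with h1 h2 h3 h4 <;> simp_all

theorem prio_eq_two (nl r : String) (h : pa1 nl r = false) : (pvPrio nl r == 2) = pa2 nl r := by
  unfold pvPrio pa2; unfold pa1 at h; split_ifs with h1 h2 h3 h4 <;> simp_all

theorem prio_eq_three (nl r : String) (h1 : pa1 nl r = false) (h2 : pa2 nl r = false) :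
    (pvPrio nl r == 3) = pa3 nl r := by
  unfold pvPrio pa3; unfold pa1 at h1; unfold pa2 at h2; split_ifs with g1 g2 g3 g4 <;> simp_all

theorem prio_eq_four (nl r : String) (h1 : pa1 nl r = false) (h2 : pa2 nl r = false)
    (h3 : pa3 nl r = false) : (pvPrio nl r == 4) = pa4 nl r := by
  unfold pvPrio pa4; unfold pa1 at h1; unfold pa2 at h2; unfold pa3 at h3
  split_ifs with g1 g2 g3 g4 <;> simp_all

theorem find?_eq_none_forall {p : String → Bool} {l : List String}
    (h : l.find? p = none) : ∀ x ∈ l, p x = false := by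
  intro x hx
  simpa using List.find?_eq_none.mp h x hx

-- ===== VERDICT (by name: the statement is the Claim_ definition above) =====
theorem find_matching_race_spec : Claim_equal_find_matching_race := by
  intro race_name races_list _
  unfold Spec_find_matching_race
  cases races_list with
  | nil => rfl
  | cons r0 rest =>
    simp only [find_matching_race, find_matching_race_alt]
    rw [fold_eq_F (PySem.Str.lower race_name) (r0 :: rest) 5 none, F_five]
    have e1 : (r0 :: rest).find? (fun r => pvPrio (PySem.Str.lower race_name) r == 1)
        = (r0 :: rest).find? (pa1 (PySem.Str.lower race_name)) :=
      find?_congr' _ _ _ (fun x _ => prio_eq_one _ x)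
    have hA1 : (r0 :: rest).find? (fun race => PySem.Str.lower race == PySem.Str.lower race_name)
        = (r0 :: rest).find? (pa1 (PySem.Str.lower race_name)) := rfl
    rw [e1, hA1]
    cases hf1 : (r0 :: rest).find? (pa1 (PySem.Str.lower race_name)) with
    | some x => simp [ob]
    | none =>
      have h1 := find?_eq_none_forall hf1
      have e2 : (r0 :: rest).find? (fun r => pvPrio (PySem.Str.lower race_name) r == 2)
          = (r0 :: rest).find? (pa2 (PySem.Str.lower race_name)) :=
        find?_congr' _ _ _ (fun x hx => prio_eq_two _ x (h1 x hx))
      have hA2 : (r0 :: rest).find? (fun race => PySem.Str.replace (PySem.Str.lower race) " " "_" == PySem.Str.lower race_name)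
          = (r0 :: rest).find? (pa2 (PySem.Str.lower race_name)) := rfl
      rw [e2, hA2]
      cases hf2 : (r0 :: rest).find? (pa2 (PySem.Str.lower race_name)) with
      | some x => simp [ob]
      | none =>
        have h2 := find?_eq_none_forall hf2
        have e3 : (r0 :: rest).find? (fun r => pvPrio (PySem.Str.lower race_name) r == 3)
            = (r0 :: rest).find? (pa3 (PySem.Str.lower race_name)) :=
          find?_congr' _ _ _ (fun x hx => prio_eq_three _ x (h1 x hx) (h2 x hx))
        have hA3 : (r0 :: rest).find? (fun race => PySem.Str.replace (PySem.Str.lower race) " " "" == PySem.Str.lower race_name)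
            = (r0 :: rest).find? (pa3 (PySem.Str.lower race_name)) := rfl
        rw [e3, hA3]
        cases hf3 : (r0 :: rest).find? (pa3 (PySem.Str.lower race_name)) with
        | some x => simp [ob]
        | none =>
          have h3 := find?_eq_none_forall hf3
          have e4 : (r0 :: rest).find? (fun r => pvPrio (PySem.Str.lower race_name) r == 4)
              = (r0 :: rest).find? (pa4 (PySem.Str.lower race_name)) :=
            find?_congr' _ _ _ (fun x hx => prio_eq_four _ x (h1 x hx) (h2 x hx) (h3 x hx))
          have hA4 : (r0 :: rest).find? (fun race =>
              PySem.Str.isIn (PySem.Str.lower race_name) (PySem.Str.lower race) ||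
              PySem.Str.isIn (PySem.Str.lower race) (PySem.Str.lower race_name) ||
              PySem.Str.isIn (PySem.Str.lower race_name) (PySem.Str.replace (PySem.Str.lower race) " " "") ||
              PySem.Str.isIn (PySem.Str.replace (PySem.Str.lower race) " " "") (PySem.Str.lower race_name))
              = (r0 :: rest).find? (pa4 (PySem.Str.lower race_name)) := rfl
          rw [e4, hA4]
          cases hf4 : (r0 :: rest).find? (pa4 (PySem.Str.lower race_name)) with
          | some x => simp [ob]
          | none => simp [ob]
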